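-- pv_equiv track=rewrite | github.com/pypi-data/pypi-mirror-397 | packages/ncompass/ncompass-0.1.11.tar.gz/ncompass-0.1.11/examples/basic_example/utils.py | calculate_replacement_sets
-- ===== SOURCE A (Python) =====
-- from typing import Any
--
-- def calculate_replacement_sets(
--     new_events: list[dict[str, Any]],
--     trace_events: list[dict[str, Any]]
-- ) -> tuple[set[str], set[str]]:
--     """Calculate replacement sets for event filtering.
--
--     Args:
--         new_events: List of new linked events
--         trace_events: List of original trace events
--
--     Returns:
--         Tuple of (both_exist_names, ua_only_names) sets
--     """
--     # Build sets of names that will be replaced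
--     replaced_names = {e.get("name", "") for e in new_events if e.get("name")}
--
--     # Separate events by category for replacement logic
--     gpu_user_annotation_events = [
--         e for e in trace_events
--         if e.get("cat") == "gpu_user_annotation" and e.get("ph") == "X"
--     ]
--     user_annotation_events = [
--         e for e in trace_events
--         if e.get("cat") == "user_annotation" and e.get("ph") == "X"
--     ]
--
--     # Build sets to determine which events to remove
--     gpu_ua_names = {e.get("name", "") for e in gpu_user_annotation_events if e.get("name")}
--     ua_names = {e.get("name", "") for e in user_annotation_events if e.get("name")}
--
--     both_exist_names = gpu_ua_names & ua_names & replaced_names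
--     ua_only_names = (ua_names - gpu_ua_names) & replaced_names
--
--     return both_exist_names, ua_only_names
-- ===== SOURCE B (Python) =====
-- def calculate_replacement_sets(new_events, trace_events):
--     """Index each name by the annotation categories it occurs under, then
--     emit results by streaming the events against that index (no intermediate
--     filtered lists, no set algebra)."""
--     replaced = {e.get("name", "") for e in new_events if e.get("name")}
--
--     # pass 1: one category index: name -> set of annotation categories it appears under
--     cats = {}
--     for e in trace_events:
--         if e.get("ph") == "X" and e.get("name") and \
--            e.get("cat") in ("gpu_user_annotation", "user_annotation"):
--             cats.setdefault(e.get("name"), set()).add(e.get("cat"))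
--
--     # pass 2: stream the events again, deciding each replaced name by membership
--     # queries on the index at the event that carries it
--     both_exist, ua_only = set(), set()
--     for e in trace_events:
--         if e.get("ph") == "X" and e.get("name") and e.get("name") in replaced:
--             c = cats.get(e.get("name"), set())
--             if e.get("cat") == "gpu_user_annotation" and "user_annotation" in c:
--                 both_exist.add(e.get("name"))
--             elif e.get("cat") == "user_annotation" and "gpu_user_annotation" not in c:
--                 ua_only.add(e.get("name"))
--     return both_exist, ua_only
-- ===== Notes on version B (the rewrite author's own statement) =====
-- stated objective: alternative
-- what changed: Replaces A's two filtered event lists, three set comprehensions and &/- set algebra with a dict index name -> set of annotation categories built in one pass, and a second streaming pass over the events that decides each replaced name by membership queries on that index.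
import Mathlib
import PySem

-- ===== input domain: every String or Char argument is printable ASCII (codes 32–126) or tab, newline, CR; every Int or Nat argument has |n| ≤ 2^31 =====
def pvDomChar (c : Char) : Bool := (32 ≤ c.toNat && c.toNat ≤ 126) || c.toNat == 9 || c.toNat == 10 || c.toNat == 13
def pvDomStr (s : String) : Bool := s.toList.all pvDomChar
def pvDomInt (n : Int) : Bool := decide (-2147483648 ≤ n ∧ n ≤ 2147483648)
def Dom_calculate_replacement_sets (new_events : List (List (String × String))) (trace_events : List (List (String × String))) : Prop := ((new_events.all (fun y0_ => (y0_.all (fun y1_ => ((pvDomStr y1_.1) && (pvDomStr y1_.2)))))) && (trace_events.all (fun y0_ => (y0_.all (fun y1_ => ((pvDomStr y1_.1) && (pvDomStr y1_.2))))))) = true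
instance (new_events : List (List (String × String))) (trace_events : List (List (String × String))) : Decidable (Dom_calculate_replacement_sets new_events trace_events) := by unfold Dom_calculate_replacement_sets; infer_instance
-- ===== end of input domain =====

-- B replaces A's two filtered event lists + three set comprehensions + &/- set algebra by a
-- name -> categories dict index built in one pass and a streaming second pass that decides each
-- replaced name by membership queries on that index (objective: alternative, same cost).

-- ===== PORT A =====
-- shared transliteration helpers: e.get("name","") / e.get("ph") == "X" / e.get("cat") == c
def pvNm (e : List (String × String)) : String := (PySem.Dict.mk e).getD "name" ""
def pvPh (e : List (String × String)) : Bool := (PySem.Dict.mk e).get? "ph" == some "X"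
def pvCatG (e : List (String × String)) : Bool := (PySem.Dict.mk e).get? "cat" == some "gpu_user_annotation"
def pvCatU (e : List (String × String)) : Bool := (PySem.Dict.mk e).get? "cat" == some "user_annotation"

def calculate_replacement_sets (new_events : List (List (String × String))) (trace_events : List (List (String × String))) : List String × List String :=
  let replaced_names := new_events.foldl (fun s e => if pvNm e != "" then PySem.Set.add s (pvNm e) else s) PySem.Set.empty
  let gpu_user_annotation_events := trace_events.filter (fun e => pvCatG e && pvPh e)
  let user_annotation_events := trace_events.filter (fun e => pvCatU e && pvPh e)
  let gpu_ua_names := gpu_user_annotation_events.foldl (fun s e => if pvNm e != "" then PySem.Set.add s (pvNm e) else s) PySem.Set.empty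
  let ua_names := user_annotation_events.foldl (fun s e => if pvNm e != "" then PySem.Set.add s (pvNm e) else s) PySem.Set.empty
  let both_exist_names := PySem.Set.inter (PySem.Set.inter gpu_ua_names ua_names) replaced_names
  let ua_only_names := PySem.Set.inter (PySem.Set.diff ua_names gpu_ua_names) replaced_names
  (both_exist_names, ua_only_names)

-- ===== PORT B =====
def calculate_replacement_sets_alt (new_events : List (List (String × String))) (trace_events : List (List (String × String))) : List String × List String :=
  let replaced := new_events.foldl (fun s e => if pvNm e != "" then PySem.Set.add s (pvNm e) else s) PySem.Set.empty
  -- cats.setdefault(e.get("name"), set()).add(e.get("cat"))  →  Dict.modify name ∅ (·.add cat)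
  let cats := trace_events.foldl (fun (d : PySem.Dict String (PySem.Set String)) e =>
      if pvPh e && (pvNm e != "") && (pvCatG e || pvCatU e) then
        d.modify (pvNm e) PySem.Set.empty (fun s => PySem.Set.add s (((PySem.Dict.mk e).get? "cat").getD ""))
      else d) PySem.Dict.empty
  let pair := trace_events.foldl (fun (r : List String × List String) e =>
      if pvPh e && (pvNm e != "") && PySem.Set.contains replaced (pvNm e) then
        let c := cats.getD (pvNm e) PySem.Set.empty
        if pvCatG e && PySem.Set.contains c "user_annotation" then
          (PySem.Set.add r.1 (pvNm e), r.2)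
        else if pvCatU e && !PySem.Set.contains c "gpu_user_annotation" then
          (r.1, PySem.Set.add r.2 (pvNm e))
        else r
      else r) (PySem.Set.empty, PySem.Set.empty)
  pair

-- ===== PRECONDITION & SPEC =====
def Spec_calculate_replacement_sets (new_events : List (List (String × String))) (trace_events : List (List (String × String))) (out : List String × List String) : Prop := out = calculate_replacement_sets_alt new_events trace_events
instance (new_events : List (List (String × String))) (trace_events : List (List (String × String))) (out : List String × List String) : Decidable (Spec_calculate_replacement_sets new_events trace_events out) := by unfold Spec_calculate_replacement_sets; infer_instance

-- ===== CLAIM (what is proved, stated in full; the proofs are below) =====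
def Claim_equal_calculate_replacement_sets : Prop := ∀ (new_events : List (List (String × String))) (trace_events : List (List (String × String))), Dom_calculate_replacement_sets new_events trace_events → Spec_calculate_replacement_sets new_events trace_events (calculate_replacement_sets new_events trace_events)

-- ===== LEMMAS AND PROOFS =====

-- name lists underlying the per-category sets, parameterised by the exact cat string
def pvCNames (c : String) (te : List (List (String × String))) : List String :=
  ((te.filter (fun e => ((PySem.Dict.mk e).get? "cat" == some c) && pvPh e)).filter (fun e => pvNm e != "")).map pvNm

-- a conditional-add fold is Set.update of the filtered, mapped list
theorem pv_fold_names {α β : Type} [BEq β] (p : α → Bool) (f : α → β) (l : List α) (acc : List β) :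
    l.foldl (fun s e => if p e then PySem.Set.add s (f e) else s) acc
      = PySem.Set.update acc ((l.filter p).map f) := by
  induction l generalizing acc with
  | nil => simp [PySem.Set.update]
  | cons e t ih =>
    simp only [List.foldl_cons, List.filter_cons]
    by_cases hp : p e
    · simp [hp, ih, PySem.Set.update]
    · simp [hp, ih]

theorem pv_add_filter_pos (p : String → Bool) (acc : List String) (y : String) (hy : p y = true) :
    (PySem.Set.add acc y).filter p = PySem.Set.add (acc.filter p) y := by
  simp only [PySem.Set.add]
  by_cases hc : PySem.Set.contains acc y = true
  · rw [if_pos hc, if_pos]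
    have : y ∈ acc := by simpa [PySem.Set.contains] using hc
    simp [PySem.Set.contains, List.mem_filter, this, hy]
  · rw [if_neg hc, if_neg]
    · simp [hy]
    · intro hmem
      have : y ∈ acc.filter p := by simpa [PySem.Set.contains] using hmem
      exact hc (by simp [PySem.Set.contains, (List.mem_filter.mp this).1])

theorem pv_add_filter_neg (p : String → Bool) (acc : List String) (y : String) (hy : p y = false) :
    (PySem.Set.add acc y).filter p = acc.filter p := by
  simp only [PySem.Set.add]
  split
  · rfl
  · simp [hy]

-- Set.update commutes with filter
theorem pv_update_filter (p : String → Bool) (ys : List String) (acc : List String) :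
    (PySem.Set.update acc ys).filter p = PySem.Set.update (acc.filter p) (ys.filter p) := by
  induction ys generalizing acc with
  | nil => simp [PySem.Set.update]
  | cons y t ih =>
    simp only [PySem.Set.update, List.foldl_cons, List.filter_cons] at *
    by_cases hy : p y
    · rw [if_pos hy, ih, pv_add_filter_pos p acc y hy]
      simp
    · rw [if_neg (by simp [hy]), ih, pv_add_filter_neg p acc y (by simpa using hy)]

theorem pv_cats_contains (c : String) (hc : c = "gpu_user_annotation" ∨ c = "user_annotation")
    (te : List (List (String × String))) (d : PySem.Dict String (PySem.Set String)) (n : String) :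
    PySem.Set.contains ((te.foldl (fun (d : PySem.Dict String (PySem.Set String)) e =>
        if pvPh e && (pvNm e != "") && (pvCatG e || pvCatU e) then
          d.modify (pvNm e) PySem.Set.empty (fun s => PySem.Set.add s (((PySem.Dict.mk e).get? "cat").getD ""))
        else d) d).getD n PySem.Set.empty) c = true
      ↔ (PySem.Set.contains (d.getD n PySem.Set.empty) c = true ∨ n ∈ pvCNames c te) := by
  induction te generalizing d with
  | nil => simp [pvCNames]
  | cons e t ih =>
    simp only [List.foldl_cons, pvCNames, List.filter_cons] at *
    cases hp : pvPh e
    · rw [if_neg (by simp), ih]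
      simp
    · cases ht : (pvNm e != "")
      · rw [if_neg (by simp), ih]
        have hte : pvNm e = "" := by simpa using ht
        by_cases hcc : (PySem.Dict.mk e).get? "cat" = some c <;> simp [hcc, hte]
      · cases hg : pvCatG e
        · cases hu : pvCatU e
          · rw [if_neg (by simp), ih]
            have hcc : ((PySem.Dict.mk e).get? "cat" == some c) = false := by
              rcases hc with rfl | rfl
              · exact hg
              · exact hu
            simp [hcc]
          · have hcat : (PySem.Dict.mk e).get? "cat" = some "user_annotation" := eq_of_beq hu
            rw [if_pos (by simp), ih]
            rcases hc with rfl | rfl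
            · -- c = gpu: the added "user_annotation" never matters
              simp only [hcat, PySem.Dict.getD_modify]
              by_cases hn : n = pvNm e
              · subst hn
                simp
              · simp [hn]
            · -- c = ua: the head event contributes its name
              simp only [hcat, PySem.Dict.getD_modify]
              by_cases hn : n = pvNm e
              · subst hn
                simp
                exact Or.inr ⟨e, ⟨Or.inl rfl, by simpa using ht⟩, rfl⟩
              · simp [hn]
                constructor
                · rintro (h | ⟨a, ⟨hat, hta, hc1, hp1⟩, hb⟩)
                  · exact Or.inl h
                  · exact Or.inr ⟨a, ⟨Or.inr ⟨hat, hc1, hp1⟩, hta⟩, hb⟩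
                · rintro (h | ⟨a, ⟨(rfl | ⟨hat, hc1, hp1⟩), hta⟩, hb⟩)
                  · exact Or.inl h
                  · exact absurd hb.symm hn
                  · exact Or.inr ⟨a, ⟨hat, hta, hc1, hp1⟩, hb⟩
        · have hcat : (PySem.Dict.mk e).get? "cat" = some "gpu_user_annotation" := eq_of_beq hg
          rw [if_pos (by simp), ih]
          rcases hc with rfl | rfl
          · -- c = gpu: the head event contributes its name
            simp only [hcat, PySem.Dict.getD_modify]
            by_cases hn : n = pvNm e
            · subst hn
              simp
              exact Or.inr ⟨e, ⟨Or.inl rfl, by simpa using ht⟩, rfl⟩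
            · simp [hn]
              constructor
              · rintro (h | ⟨a, ⟨hat, hta, hc1, hp1⟩, hb⟩)
                · exact Or.inl h
                · exact Or.inr ⟨a, ⟨Or.inr ⟨hat, hc1, hp1⟩, hta⟩, hb⟩
              · rintro (h | ⟨a, ⟨(rfl | ⟨hat, hc1, hp1⟩), hta⟩, hb⟩)
                · exact Or.inl h
                · exact absurd hb.symm hn
                · exact Or.inr ⟨a, ⟨hat, hta, hc1, hp1⟩, hb⟩
          · -- c = ua: the added "gpu_user_annotation" never matters
            simp only [hcat, PySem.Dict.getD_modify]
            by_cases hn : n = pvNm e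
            · subst hn
              simp
            · simp [hn]

-- B's fused pair-fold splits into two scalar conditional-add folds
theorem pv_pair_fold {α : Type} (p q1 q2 : α → Bool) (f : α → String)
    (hx : ∀ e, ¬(q1 e = true ∧ q2 e = true))
    (te : List α) (g u : List String) :
    te.foldl (fun (r : List String × List String) e =>
        if p e then
          if q1 e then (PySem.Set.add r.1 (f e), r.2)
          else if q2 e then (r.1, PySem.Set.add r.2 (f e))
          else r
        else r) (g, u)
      = (te.foldl (fun s e => if p e && q1 e then PySem.Set.add s (f e) else s) g,
         te.foldl (fun s e => if p e && q2 e then PySem.Set.add s (f e) else s) u) := by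
  induction te generalizing g u with
  | nil => rfl
  | cons e t ih =>
    simp only [List.foldl_cons]
    have step : (if p e then
          if q1 e then (PySem.Set.add g (f e), u)
          else if q2 e then (g, PySem.Set.add u (f e))
          else (g, u)
        else (g, u))
        = ((if p e && q1 e then PySem.Set.add g (f e) else g),
           (if p e && q2 e then PySem.Set.add u (f e) else u)) := by
      cases hp : p e <;> cases h1 : q1 e <;> cases h2 : q2 e <;> simp_all
    rw [step, ih]


-- contains on a built set is membership of the underlying name list
theorem pv_contains_update_nil (xs : List String) (n : String) :
    PySem.Set.contains (PySem.Set.update PySem.Set.empty xs) n = decide (n ∈ xs) := by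
  simp [PySem.Set.contains]


-- one output component: B's single filtered pass equals "collect then filter"
theorem pv_component (catA : List (String × String) → Bool) (Q : String → Bool)
    (repl : PySem.Set String) (te : List (List (String × String))) :
    PySem.Set.update PySem.Set.empty ((te.filter (fun e =>
        pvPh e && (pvNm e != "") && PySem.Set.contains repl (pvNm e) && (catA e && Q (pvNm e)))).map pvNm)
      = (PySem.Set.update PySem.Set.empty
          (((te.filter (fun e => catA e && pvPh e)).filter (fun e => pvNm e != "")).map pvNm)).filter
          (fun n => Q n && PySem.Set.contains repl n) := by
  have h1 : te.filter (fun e =>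
        pvPh e && (pvNm e != "") && PySem.Set.contains repl (pvNm e) && (catA e && Q (pvNm e)))
      = ((te.filter (fun e => catA e && pvPh e)).filter (fun e => pvNm e != "")).filter
          (fun e => Q (pvNm e) && PySem.Set.contains repl (pvNm e)) := by
    rw [List.filter_filter, List.filter_filter]
    refine List.filter_congr ?_
    intro e _
    cases catA e <;> cases pvPh e <;> cases (pvNm e != "") <;> cases Q (pvNm e) <;>
      cases PySem.Set.contains repl (pvNm e) <;> rfl
  rw [h1,
      show (fun e => Q (pvNm e) && PySem.Set.contains repl (pvNm e))
        = ((fun n => Q n && PySem.Set.contains repl n) ∘ pvNm) from rfl,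
      ← List.filter_map, show (PySem.Set.empty : List String) = ([] : List String) from rfl,
      pv_update_filter]
  rfl

theorem pv_main : ∀ (ne te : List (List (String × String))),
    calculate_replacement_sets ne te = calculate_replacement_sets_alt ne te := by
  intro ne te
  unfold calculate_replacement_sets calculate_replacement_sets_alt
  simp only [pv_fold_names]
  set repl := PySem.Set.update PySem.Set.empty ((ne.filter (fun e => pvNm e != "")).map pvNm) with hrepl
  -- B: the index tests are membership of the per-category name lists
  have hU : ∀ n : String, PySem.Set.contains ((te.foldl (fun (d : PySem.Dict String (PySem.Set String)) e =>
        if pvPh e && (pvNm e != "") && (pvCatG e || pvCatU e) then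
          d.modify (pvNm e) PySem.Set.empty (fun s => PySem.Set.add s (((PySem.Dict.mk e).get? "cat").getD ""))
        else d) PySem.Dict.empty).getD n PySem.Set.empty) "user_annotation"
      = decide (n ∈ pvCNames "user_annotation" te) := by
    intro n
    have h := pv_cats_contains "user_annotation" (Or.inr rfl) te PySem.Dict.empty n
    simp only [PySem.Dict.getD_empty] at h
    cases hx : PySem.Set.contains ((te.foldl _ PySem.Dict.empty).getD n PySem.Set.empty) "user_annotation"
    · rw [hx] at h
      simp only [PySem.Set.contains] at h
      simp at h ⊢
      tauto
    · rw [hx] at h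
      simp only [PySem.Set.contains] at h
      simp at h ⊢
      tauto
  have hG : ∀ n : String, PySem.Set.contains ((te.foldl (fun (d : PySem.Dict String (PySem.Set String)) e =>
        if pvPh e && (pvNm e != "") && (pvCatG e || pvCatU e) then
          d.modify (pvNm e) PySem.Set.empty (fun s => PySem.Set.add s (((PySem.Dict.mk e).get? "cat").getD ""))
        else d) PySem.Dict.empty).getD n PySem.Set.empty) "gpu_user_annotation"
      = decide (n ∈ pvCNames "gpu_user_annotation" te) := by
    intro n
    have h := pv_cats_contains "gpu_user_annotation" (Or.inl rfl) te PySem.Dict.empty n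
    simp only [PySem.Dict.getD_empty] at h
    cases hx : PySem.Set.contains ((te.foldl _ PySem.Dict.empty).getD n PySem.Set.empty) "gpu_user_annotation"
    · rw [hx] at h
      simp only [PySem.Set.contains] at h
      simp at h ⊢
      tauto
    · rw [hx] at h
      simp only [PySem.Set.contains] at h
      simp at h ⊢
      tauto
  simp only [hU, hG]
  rw [pv_pair_fold
        (fun e => pvPh e && (pvNm e != "") && PySem.Set.contains repl (pvNm e))
        (fun e => pvCatG e && decide (pvNm e ∈ pvCNames "user_annotation" te))
        (fun e => pvCatU e && !decide (pvNm e ∈ pvCNames "gpu_user_annotation" te))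
        pvNm
        (by
          intro e ⟨h1, h2⟩
          have hg : pvCatG e = true := by simpa using (Bool.and_elim_left h1)
          have hu : pvCatU e = true := by simpa using (Bool.and_elim_left h2)
          exact absurd (Option.some.inj ((eq_of_beq hg).symm.trans (eq_of_beq hu))) (by decide))]
  simp only [pv_fold_names]
  have hgn : pvCNames "gpu_user_annotation" te
      = ((te.filter (fun e => pvCatG e && pvPh e)).filter (fun e => pvNm e != "")).map pvNm := rfl
  have hun : pvCNames "user_annotation" te
      = ((te.filter (fun e => pvCatU e && pvPh e)).filter (fun e => pvNm e != "")).map pvNm := rfl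
  rw [← hgn, ← hun]
  rw [pv_component pvCatG (fun n => decide (n ∈ pvCNames "user_annotation" te)) repl te,
      pv_component pvCatU (fun n => !decide (n ∈ pvCNames "gpu_user_annotation" te)) repl te]
  have hgn2 : ((te.filter (fun a => (pvNm a != "") && (pvCatG a && pvPh a))).map pvNm)
      = pvCNames "gpu_user_annotation" te := by rw [hgn, List.filter_filter]
  have hun2 : ((te.filter (fun a => (pvNm a != "") && (pvCatU a && pvPh a))).map pvNm)
      = pvCNames "user_annotation" te := by rw [hun, List.filter_filter]
  simp only [Prod.mk.injEq]
  refine ⟨?_, ?_⟩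
  · simp only [PySem.Set.inter, List.filter_filter]
    rw [hgn2]
    refine List.filter_congr ?_
    intro n _
    rw [pv_contains_update_nil, pv_contains_update_nil]
    exact Bool.and_comm _ _
  · simp only [PySem.Set.inter, PySem.Set.diff, List.filter_filter]
    rw [hun2]
    refine List.filter_congr ?_
    intro n _
    rw [pv_contains_update_nil, pv_contains_update_nil]
    exact Bool.and_comm _ _

-- ===== VERDICT (by name: the statement is the Claim_ definition above) =====
theorem calculate_replacement_sets_spec : Claim_equal_calculate_replacement_sets := by
  intro ne te _
  unfold Spec_calculate_replacement_sets
  exact pv_main ne te
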